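-- pv_equiv track=rewrite | github.com/MLL-LabChartAgentVagen/chartAgentVAGEN | phase_3/question_pipeline/pipeline_composer.py | _enumerate_params
-- ===== SOURCE A (Python) =====
-- import itertools
-- from typing import Any, Dict, List, Optional, Type
--
-- def _enumerate_params(
--     constraints: Optional[Dict[str, List[Any]]]
-- ) -> List[Dict[str, Any]]:
--     """Expand param_constraints into all combinations.
--
--     Example: {"k": [3, 5], "ascending": [True, False]}
--     → [{"k": 3, "ascending": True}, {"k": 3, "ascending": False},
--        {"k": 5, "ascending": True}, {"k": 5, "ascending": False}]
--     """
--     if not constraints: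
--         return [{}]
--
--     keys = list(constraints.keys())
--     value_lists = [constraints[k] for k in keys]
--     combos = list(itertools.product(*value_lists))
--     return [dict(zip(keys, vals)) for vals in combos]
-- ===== SOURCE B (Python) =====
-- def _enumerate_params(constraints):
--     """Expand param_constraints into all combinations (iterative accumulator:
--     grow the list of partial dicts one key at a time; leftmost key varies slowest)."""
--     result = [{}]
--     for key, values in (constraints or {}).items():
--         result = [{**combo, key: v} for combo in result for v in values]
--     return result
-- ===== Notes on version B (the rewrite author's own statement) =====
-- stated objective: alternative
-- what changed: Replaces the keys/value_lists/itertools.product/dict(zip(...)) pipeline with a single iterative accumulator that starts from one empty partial dict and extends every partial dict with each value of one key per step; the empty/None guard disappears because iterating over no keys leaves just the empty combination.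
import Mathlib
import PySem

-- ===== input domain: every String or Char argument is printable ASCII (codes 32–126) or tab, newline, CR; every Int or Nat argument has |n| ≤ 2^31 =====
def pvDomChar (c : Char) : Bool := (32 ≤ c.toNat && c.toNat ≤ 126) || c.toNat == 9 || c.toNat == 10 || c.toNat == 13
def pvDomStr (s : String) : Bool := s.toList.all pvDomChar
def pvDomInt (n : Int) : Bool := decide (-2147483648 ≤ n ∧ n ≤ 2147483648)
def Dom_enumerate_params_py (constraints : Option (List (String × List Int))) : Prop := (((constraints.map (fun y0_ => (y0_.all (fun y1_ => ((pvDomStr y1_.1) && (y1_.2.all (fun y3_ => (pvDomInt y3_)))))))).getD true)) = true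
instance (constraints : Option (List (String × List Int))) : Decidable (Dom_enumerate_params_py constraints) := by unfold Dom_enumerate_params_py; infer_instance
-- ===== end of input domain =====

-- B replaces the keys/product/dict(zip) pipeline with an iterative accumulator of partial dicts (different decomposition, same cost).

-- ===== PORT A =====
-- itertools.product(*value_lists): leftmost list varies slowest
def pvProd : List (List Int) → List (List Int)
  | [] => [[]]
  | vs :: rest => vs.flatMap (fun v => (pvProd rest).map (fun c => v :: c))

-- dict(zip(keys, vals))
def pvDictZip (keys : List String) (vals : List Int) : List (String × Int) :=
  ((keys.zip vals).foldl (fun d p => d.insert p.1 p.2) PySem.Dict.empty).items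

def enumerate_params_py (constraints : Option (List (String × List Int))) : List (List (String × Int)) :=
  match constraints with
  | none => [[]]
  | some c =>
    if c.isEmpty then [[]]
    else
      let keys := c.map Prod.fst
      let value_lists := keys.map (fun k => ((PySem.Dict.mk c).get? k).getD [])
      let combos := pvProd value_lists
      combos.map (fun vals => pvDictZip keys vals)

-- ===== PORT B =====
def enumerate_params_py_alt (constraints : Option (List (String × List Int))) : List (List (String × Int)) :=
  (constraints.getD []).foldl
    (fun result kv =>
      result.flatMap (fun combo => kv.2.map (fun v => ((PySem.Dict.mk combo).insert kv.1 v).items)))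
    [[]]

-- ===== PRECONDITION & SPEC =====
-- Pre_ excludes association lists with duplicate keys: they are ambiguous encodings of a
-- Python dict (a dict literal collapses duplicate keys before A ever sees them), so no
-- behaviour of A on such a list is specified.
def Pre_enumerate_params_py (constraints : Option (List (String × List Int))) : Prop :=
  ((constraints.getD []).map Prod.fst).Nodup
instance (constraints : Option (List (String × List Int))) : Decidable (Pre_enumerate_params_py constraints) := by unfold Pre_enumerate_params_py; infer_instance
def pvWitness_enumerate_params_py : (Option (List (String × List Int))) :=
  some [("k", [3, 5]), ("ascending", [1, 0])]

def Spec_enumerate_params_py (constraints : Option (List (String × List Int))) (out : List (List (String × Int))) : Prop := out = enumerate_params_py_alt constraints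
instance (constraints : Option (List (String × List Int))) (out : List (List (String × Int))) : Decidable (Spec_enumerate_params_py constraints out) := by unfold Spec_enumerate_params_py; infer_instance

-- ===== CLAIM (what is proved, stated in full; the proofs are below) =====
def Claim_equal_enumerate_params_py : Prop := ∀ (constraints : Option (List (String × List Int))), Dom_enumerate_params_py constraints → Pre_enumerate_params_py constraints → Spec_enumerate_params_py constraints (enumerate_params_py constraints)

-- ===== LEMMAS AND PROOFS =====

-- canonical form of the result: product over the association list itself
def pvCore : List (String × List Int) → List (List (String × Int))
  | [] => [[]]
  | (k, vs) :: rest => vs.flatMap (fun v => (pvCore rest).map (fun t => (k, v) :: t))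

lemma map_fst_zip_eq_take : ∀ (keys : List String) (vals : List Int),
    (keys.zip vals).map Prod.fst = keys.take vals.length := by
  intro keys
  induction keys with
  | nil => intro vals; simp
  | cons k ks ih =>
    intro vals
    cases vals with
    | nil => simp
    | cons v vs => simp [ih]

lemma pvDictZip_eq_zip (keys : List String) (vals : List Int) (h : keys.Nodup) :
    pvDictZip keys vals = keys.zip vals := by
  unfold pvDictZip
  have hfresh : ∀ p ∈ keys.zip vals, (PySem.Dict.empty : PySem.Dict String Int).contains p.1 = false := by
    intro p _; exact PySem.Dict.contains_empty _
  have hnd : ((keys.zip vals).map Prod.fst).Nodup := by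
    rw [map_fst_zip_eq_take]
    exact h.sublist (List.take_sublist ..)
  have := PySem.Dict.items_foldl_insert_fresh (keys.zip vals) Prod.fst Prod.snd
      (PySem.Dict.empty) hfresh hnd
  simpa using this

lemma lookup_map_fst : ∀ (c : List (String × List Int)), (c.map Prod.fst).Nodup →
    (c.map Prod.fst).map (fun k => ((PySem.Dict.mk c).get? k).getD []) = c.map Prod.snd := by
  intro c
  induction c with
  | nil => intro _; simp
  | cons p rest ih =>
    intro hnd
    obtain ⟨k, vs⟩ := p
    simp only [List.map_cons] at hnd ⊢
    have hnd' := hnd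
    rw [List.nodup_cons] at hnd'
    refine List.cons_eq_cons.mpr ⟨?_, ?_⟩
    · simp [PySem.Dict.get?_mk_cons]
    · have hcong : ∀ k' ∈ rest.map Prod.fst,
          ((PySem.Dict.mk ((k, vs) :: rest)).get? k').getD [] = ((PySem.Dict.mk rest).get? k').getD [] := by
        intro k' hk'
        have hne : k ≠ k' := by
          intro he; exact hnd'.1 (by simpa [← he] using hk')
        simp [PySem.Dict.get?_mk_cons, hne]
      calc (rest.map Prod.fst).map (fun k' => ((PySem.Dict.mk ((k, vs) :: rest)).get? k').getD [])
          = (rest.map Prod.fst).map (fun k' => ((PySem.Dict.mk rest).get? k').getD []) :=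
            List.map_congr_left hcong
        _ = rest.map Prod.snd := ih hnd'.2

lemma map_zip_prod : ∀ (c : List (String × List Int)),
    (pvProd (c.map Prod.snd)).map (fun vals => (c.map Prod.fst).zip vals) = pvCore c := by
  intro c
  induction c with
  | nil => simp [pvProd, pvCore]
  | cons p rest ih =>
    obtain ⟨k, vs⟩ := p
    simp only [List.map_cons, pvProd, pvCore, List.map_flatMap, List.map_map]
    refine List.flatMap_congr (fun v _ => ?_)
    rw [← ih]
    simp [List.map_map, Function.comp]

lemma items_insert_mk (combo : List (String × Int)) (k : String) (v : Int)
    (h : k ∉ combo.map Prod.fst) :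
    ((PySem.Dict.mk combo).insert k v).items = combo ++ [(k, v)] := by
  have hc : (PySem.Dict.mk combo).contains k = false := by
    rw [PySem.Dict.contains_eq_decide_mem_keys]
    simpa [PySem.Dict.keys] using h
  rw [PySem.Dict.items_insert]
  simp [hc]

lemma b_fold : ∀ (c : List (String × List Int)) (acc : List (List (String × Int))),
    (c.map Prod.fst).Nodup →
    (∀ combo ∈ acc, ∀ k ∈ c.map Prod.fst, k ∉ combo.map Prod.fst) →
    c.foldl (fun result kv =>
        result.flatMap (fun combo => kv.2.map (fun v => ((PySem.Dict.mk combo).insert kv.1 v).items))) acc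
      = acc.flatMap (fun combo => (pvCore c).map (fun t => combo ++ t)) := by
  intro c
  induction c with
  | nil => intro acc _ _; simp [pvCore]
  | cons p rest ih =>
    intro acc hnd hdisj
    obtain ⟨k, vs⟩ := p
    simp only [List.map_cons, List.nodup_cons] at hnd
    simp only [List.foldl_cons]
    have hstep : acc.flatMap (fun combo => vs.map (fun v => ((PySem.Dict.mk combo).insert k v).items))
        = acc.flatMap (fun combo => vs.map (fun v => combo ++ [(k, v)])) := by
      refine List.flatMap_congr (fun combo hcombo => ?_)
      refine List.map_congr_left (fun v _ => ?_)
      exact items_insert_mk combo k v (hdisj combo hcombo k (by simp))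
    rw [hstep]
    rw [ih _ hnd.2 ?_]
    · simp [List.flatMap_assoc, List.flatMap_map, List.map_flatMap, List.map_map,
        Function.comp_def, pvCore, List.append_assoc]
    · intro combo' hcombo' k' hk'
      simp only [List.mem_flatMap, List.mem_map] at hcombo'
      obtain ⟨combo, hcombo, v, _, rfl⟩ := hcombo'
      simp only [List.map_append, List.map_cons, List.map_nil, List.mem_append, List.mem_cons]
      rintro (h | h)
      · exact hdisj combo hcombo k' (by simp [hk']) h
      · rcases h with h | h
        · exact hnd.1 (h ▸ hk')
        · simp at h

-- ===== VERDICT (by name: the statement is the Claim_ definition above) =====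
theorem enumerate_params_py_spec : Claim_equal_enumerate_params_py := by
  intro constraints _ hpre
  unfold Spec_enumerate_params_py enumerate_params_py enumerate_params_py_alt
  cases constraints with
  | none => simp
  | some c =>
    unfold Pre_enumerate_params_py at hpre
    simp only [Option.getD_some] at hpre ⊢
    rw [b_fold c [[]] hpre (by intro combo h; simp at h; simp [h])]
    by_cases hc : c.isEmpty
    · rw [List.isEmpty_iff] at hc
      subst hc; simp [pvCore]
    · simp only [hc, if_neg, Bool.false_eq_true, not_false_iff]
      have hlk := lookup_map_fst c hpre
      rw [hlk]
      have : (pvProd (c.map Prod.snd)).map (fun vals => pvDictZip (c.map Prod.fst) vals)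
          = (pvProd (c.map Prod.snd)).map (fun vals => (c.map Prod.fst).zip vals) := by
        refine List.map_congr_left (fun vals _ => ?_)
        exact pvDictZip_eq_zip _ _ hpre
      rw [this, map_zip_prod]
      simp
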